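-- pv_equiv track=rewrite | github.com/egregori3/FAQtojson | FAQListToListOfDicts.py | convert
-- ===== SOURCE A (Python) =====
-- def convert(faq):
--     outList = []
--     questionIndexes = [i for i in range(len(faq)) if faq[i].find('?')>0]
--     for i in range(1,len(questionIndexes)):
--         question = faq[questionIndexes[i-1]].rstrip()
--         response = ""
--         for line in range(questionIndexes[i-1]+1,questionIndexes[i]):
--             response += faq[line].replace('\n',' ')
--         outDict = {'question':question, 'response':response}
--         outList.append(outDict)
--     return outList
-- ===== SOURCE B (Python) =====
-- def convert(faq):
--     out = []
--     current_question = None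
--     current_response = ""
--     for line in faq:
--         if line.find('?') > 0:
--             if current_question is not None:
--                 out.append({'question': current_question.rstrip(),
--                             'response': current_response})
--             current_question = line
--             current_response = ""
--         elif current_question is not None:
--             current_response += line.replace('\n', ' ')
--     return out
-- ===== Notes on version B (the rewrite author's own statement) =====
-- stated objective: simpler
-- what changed: Replaces A's build-an-index-list-then-iterate-consecutive-index-gaps (with an inner indexed loop re-reading faq for each gap) by a single linear state-machine pass holding the current question and accumulated response, flushing an entry when the next question line arrives and never flushing the last question.
import Mathlib
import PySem

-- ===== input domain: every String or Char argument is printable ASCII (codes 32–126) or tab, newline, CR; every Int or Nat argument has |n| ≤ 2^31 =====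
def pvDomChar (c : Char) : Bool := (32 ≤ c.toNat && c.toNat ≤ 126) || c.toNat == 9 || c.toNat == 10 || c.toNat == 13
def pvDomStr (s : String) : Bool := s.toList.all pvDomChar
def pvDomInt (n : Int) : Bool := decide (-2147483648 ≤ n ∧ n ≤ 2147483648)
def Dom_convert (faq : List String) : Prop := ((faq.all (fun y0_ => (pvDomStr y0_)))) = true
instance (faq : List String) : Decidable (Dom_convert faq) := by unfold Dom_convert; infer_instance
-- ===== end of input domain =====

-- B replaces A's question-index list + consecutive-index-gap iteration by one linear
-- state-machine pass (current question / accumulated response); objective: simpler.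

-- ===== PORT A =====
def convert (faq : List String) : List (List (String × String)) :=
  let questionIndexes :=
    (PySem.List.pyRange 0 (faq.length : Int)).filter
      (fun i => decide (PySem.Str.find (PySem.List.pyGetD faq i "") "?" > 0))
  (PySem.List.pyRange 1 (questionIndexes.length : Int)).foldl
    (fun outList i =>
      outList ++
        [[("question",
            PySem.Str.rstrip
              (PySem.List.pyGetD faq (PySem.List.pyGetD questionIndexes (i - 1) 0) "")),
          ("response",
            (PySem.List.pyRange (PySem.List.pyGetD questionIndexes (i - 1) 0 + 1)
                (PySem.List.pyGetD questionIndexes i 0)).foldl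
              (fun response line =>
                response ++ PySem.Str.replace (PySem.List.pyGetD faq line "") "\n" " ")
              "")]])
    []

-- ===== PORT B =====
-- loop body of B's single pass: state = (current_question, current_response, out)
def altStep (st : Option String × String × List (List (String × String))) (line : String) :
    Option String × String × List (List (String × String)) :=
  if PySem.Str.find line "?" > 0 then
    match st.1 with
    | some q =>
        (some line, "",
          st.2.2 ++ [[("question", PySem.Str.rstrip q), ("response", st.2.1)]])
    | none => (some line, "", st.2.2)
  else
    match st.1 with
    | some _ => (st.1, st.2.1 ++ PySem.Str.replace line "\n" " ", st.2.2)
    | none => st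

def convert_alt (faq : List String) : List (List (String × String)) :=
  (faq.foldl altStep (none, "", [])).2.2

-- ===== PRECONDITION & SPEC =====
def Spec_convert (faq : List String) (out : List (List (String × String))) : Prop := out = convert_alt faq
instance (faq : List String) (out : List (List (String × String))) : Decidable (Spec_convert faq out) := by unfold Spec_convert; infer_instance

-- ===== CLAIM (what is proved, stated in full; the proofs are below) =====
def Claim_equal_convert : Prop := ∀ (faq : List String), Dom_convert faq → Spec_convert faq (convert faq)

-- ===== LEMMAS AND PROOFS =====

-- proof-only abbreviations
def qB (s : String) : Bool := decide (PySem.Str.find s "?" > 0)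
def repNl (s : String) : String := PySem.Str.replace s "\n" " "
def entryQR (q r : String) : List (String × String) :=
  [("question", PySem.Str.rstrip q), ("response", r)]
def concatRep : List String → String
  | [] => ""
  | l :: ls => repNl l ++ concatRep ls

-- indices of question lines, structurally
def qsF : List String → List Nat
  | [] => []
  | l :: ls => if qB l then 0 :: (qsF ls).map (· + 1) else (qsF ls).map (· + 1)

-- the entry A builds for the consecutive question indices a < b
def fA (faq : List String) (a b : Nat) : List (String × String) :=
  entryQR (faq.getD a "") (concatRep ((faq.drop (a + 1)).take (b - (a + 1))))

-- map over consecutive pairs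
def chainE (f : Nat → Nat → List (String × String)) : List Nat → List (List (String × String))
  | a :: b :: t => f a b :: chainE f (b :: t)
  | _ => []

def PA (faq : List String) : List (List (String × String)) := chainE (fA faq) (qsF faq)

-- B's state machine as structural recursion
def specGo (q r : String) : List String → List (List (String × String))
  | [] => []
  | l :: ls => if qB l then entryQR q r :: specGo l "" ls else specGo q (r ++ repNl l) ls

def specTop : List String → List (List (String × String))
  | [] => []
  | l :: ls => if qB l then specGo l "" ls else specTop ls

-- ---------- B-side ----------
lemma altGo (ls : List String) : ∀ (q r : String) (out : List (List (String × String))),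
    (ls.foldl altStep (some q, r, out)).2.2 = out ++ specGo q r ls := by
  induction ls with
  | nil => intro q r out; simp [specGo]
  | cons l t ih =>
    intro q r out
    by_cases h : 0 < PySem.Chars.find l.toList ['?']
    · simp [altStep, specGo, qB, h, ih, entryQR]
    · simp [altStep, specGo, qB, h, ih, repNl]

lemma altNone (ls : List String) : ∀ (r : String) (out : List (List (String × String))),
    (ls.foldl altStep (none, r, out)).2.2 = out ++ specTop ls := by
  induction ls with
  | nil => intro r out; simp [specTop]
  | cons l t ih =>
    intro r out
    by_cases h : 0 < PySem.Chars.find l.toList ['?']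
    · simp [altStep, specTop, qB, h, altGo]
    · simp [altStep, specTop, qB, h, ih]

lemma convert_alt_eq_specTop (faq : List String) : convert_alt faq = specTop faq := by
  simp [convert_alt, altNone]

-- ---------- A-side ----------
lemma qsF_eq (faq : List String) :
    qsF faq = (List.range faq.length).filter (fun i => qB (faq.getD i "")) := by
  induction faq with
  | nil => rfl
  | cons l t ih =>
    by_cases h : qB l <;>
      simp [qsF, List.length_cons, List.range_succ_eq_map, List.filter_map, ih,
        Function.comp_def, Nat.succ_eq_add_one, h]

lemma pyRange_natCast_le {a b : Nat} (h : b ≤ a) : PySem.List.pyRange (a : Int) (b : Int) = [] :=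
  PySem.List.pyRange_one_eq_nil (by exact_mod_cast h)

lemma pyRange_one_natCast (m : Nat) :
    PySem.List.pyRange 1 ((m + 1 : Nat) : Int) =
      (List.range m).map (fun k => ((k + 1 : Nat) : Int)) := by
  have h0 : (0 : Int) < ((m + 1 : Nat) : Int) := by exact_mod_cast Nat.succ_pos m
  have h := PySem.List.pyRange_zero_natCast (m + 1)
  rw [PySem.List.pyRange_one_cons h0, List.range_succ_eq_map, List.map_cons] at h
  have := List.cons.injEq (0 : Int) (PySem.List.pyRange (0 + 1) ((m + 1 : Nat) : Int))
    (0 : Int) ((List.range m).map (fun k => ((Nat.succ k : Nat) : Int)))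
  rw [List.map_map] at h
  have ht := (List.cons.injEq _ _ _ _).mp h
  simpa [Nat.succ_eq_add_one] using ht.2

lemma innerFold (faq : List String) : ∀ (len a : Nat) (r : String),
    (PySem.List.pyRange (a : Int) ((a + len : Nat) : Int)).foldl
        (fun resp j => resp ++ PySem.Str.replace (PySem.List.pyGetD faq j "") "\n" " ") r =
      r ++ concatRep ((faq.drop a).take len) := by
  intro len
  induction len with
  | zero => intro a r; simp [pyRange_natCast_le (Nat.le_refl a), concatRep]
  | succ n ih =>
    intro a r
    have hlt : (a : Int) < ((a + (n + 1) : Nat) : Int) := by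
      push_cast; omega
    rw [PySem.List.pyRange_one_cons hlt]
    have hc : (a : Int) + 1 = ((a + 1 : Nat) : Int) := by push_cast; ring
    have he : ((a + (n + 1) : Nat) : Int) = (((a + 1) + n : Nat) : Int) := by push_cast; ring
    rw [List.foldl_cons, hc, he, ih (a + 1)]
    rw [PySem.List.pyGetD_natCast]
    by_cases hlen : a < faq.length
    · obtain ⟨x, hx⟩ : ∃ x, faq.getD a "" = x := ⟨_, rfl⟩
      have hdrop : faq.drop a = faq.getD a "" :: faq.drop (a + 1) := by
        rw [List.getD_eq_getElem faq "" hlen]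
        exact (List.drop_eq_getElem_cons hlen)
      rw [hdrop, List.take_succ_cons, concatRep, repNl, String.append_assoc]
    · have h1 : faq.drop a = [] := List.drop_eq_nil_of_le (by omega)
      have h2 : faq.drop (a + 1) = [] := List.drop_eq_nil_of_le (by omega)
      have h3 : faq[a]? = none := by
        rw [List.getElem?_eq_none_iff]; omega
      have h4 : PySem.Str.replace "" "\n" " " = "" := rfl
      simp [h1, h2, h3, concatRep, List.getD, h4]

lemma innerFold' (faq : List String) (a b : Nat) (r : String) :
    (PySem.List.pyRange (a : Int) (b : Int)).foldl
        (fun resp j => resp ++ PySem.Str.replace (PySem.List.pyGetD faq j "") "\n" " ") r =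
      r ++ concatRep ((faq.drop a).take (b - a)) := by
  by_cases h : b ≤ a
  · rw [pyRange_natCast_le h]
    simp [Nat.sub_eq_zero_of_le h, concatRep]
  · have hb : b = a + (b - a) := by omega
    rw [hb, innerFold faq (b - a) a r]
    have h2 : a + (b - a) - a = b - a := by omega
    rw [h2]

lemma chainE_eq (g : Nat → Nat → List (String × String)) : ∀ (l : List Nat),
    (List.range (l.length - 1)).map (fun k => g (l.getD k 0) (l.getD (k + 1) 0)) = chainE g l := by
  intro l
  induction l with
  | nil => rfl
  | cons a t ih =>
    cases t with
    | nil => rfl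
    | cons b t' =>
      simp only [List.length_cons, Nat.add_sub_cancel, List.range_succ_eq_map, List.map_cons,
        List.map_map]
      rw [chainE]
      congr 1

lemma chainE_shift (l : String) (ls : List String) : ∀ (js : List Nat),
    chainE (fA (l :: ls)) (js.map (· + 1)) = chainE (fA ls) js := by
  intro js
  induction js with
  | nil => rfl
  | cons a t ih =>
    cases t with
    | nil => rfl
    | cons b t' =>
      simp only [List.map_cons] at *
      rw [chainE, chainE, ih]
      congr 1
      simp [fA, Nat.succ_sub_succ]

lemma specGo_nil (ls : List String) : ∀ (q r : String), qsF ls = [] → specGo q r ls = [] := by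
  induction ls with
  | nil => intro q r _; rfl
  | cons l t ih =>
    intro q r h
    by_cases hq : qB l
    · simp [qsF, hq] at h
    · simp [qsF, hq] at h
      simp [specGo, hq, ih q (r ++ repNl l) h]

lemma specGo_cons (ls : List String) : ∀ (q r : String) (b : Nat) (rest : List Nat),
    qsF ls = b :: rest →
    specGo q r ls = entryQR q (r ++ concatRep (ls.take b)) :: PA ls := by
  induction ls with
  | nil => intro q r b rest h; simp [qsF] at h
  | cons l t ih =>
    intro q r b rest h
    by_cases hq : qB l
    · have hqs : qsF (l :: t) = 0 :: (qsF t).map (· + 1) := by simp [qsF, hq]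
      rw [hqs] at h
      obtain ⟨hb, hrest⟩ := List.cons.inj h
      subst hb
      rw [specGo, if_pos hq]
      rw [List.take_zero]
      have hhead : r ++ concatRep [] = r := by simp [concatRep]
      rw [hhead]
      congr 1
      rcases ht : qsF t with _ | ⟨b', rest'⟩
      · rw [specGo_nil t l "" ht]
        simp [PA, hqs, ht, chainE]
      · rw [ih l "" b' rest' ht]
        have : PA (l :: t) = fA (l :: t) 0 (b' + 1) :: PA t := by
          simp only [PA, hqs, ht, List.map_cons]
          rw [chainE]
          congr 1
          have : ((b' + 1) :: rest'.map (· + 1)) = (b' :: rest').map (· + 1) := by simp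
          rw [this, chainE_shift]
        rw [this, String.empty_append]
        rfl
    · have hqs : qsF (l :: t) = (qsF t).map (· + 1) := by simp [qsF, hq]
      rcases ht : qsF t with _ | ⟨b0, rest0⟩
      · rw [hqs, ht] at h; simp at h
      · rw [specGo, if_neg hq, ih q (r ++ repNl l) b0 rest0 ht]
        rw [hqs, ht] at h
        obtain ⟨hb, hrest⟩ := List.cons.inj h
        subst hb
        have hP : PA (l :: t) = PA t := by
          simp only [PA, hqs]
          rw [chainE_shift, ht]
        rw [hP]
        congr 2
        rw [List.take_succ_cons, concatRep, ← String.append_assoc]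

lemma specTop_eq_PA (faq : List String) : specTop faq = PA faq := by
  induction faq with
  | nil => rfl
  | cons l t ih =>
    by_cases hq : qB l
    · have hqs : qsF (l :: t) = 0 :: (qsF t).map (· + 1) := by simp [qsF, hq]
      rw [specTop, if_pos hq]
      rcases ht : qsF t with _ | ⟨b', rest'⟩
      · rw [specGo_nil t l "" ht]
        simp [PA, hqs, ht, chainE]
      · rw [specGo_cons t l "" b' rest' ht]
        have : PA (l :: t) = fA (l :: t) 0 (b' + 1) :: PA t := by
          simp only [PA, hqs, ht, List.map_cons]
          rw [chainE]
          congr 1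
          have : ((b' + 1) :: rest'.map (· + 1)) = (b' :: rest').map (· + 1) := by simp
          rw [this, chainE_shift]
        rw [this, String.empty_append]
        rfl
    · have hqs : qsF (l :: t) = (qsF t).map (· + 1) := by simp [qsF, hq]
      rw [specTop, if_neg hq, ih]
      simp only [PA, hqs]
      rw [chainE_shift]

lemma convert_eq_PA (faq : List String) : convert faq = PA faq := by
  have hqidx :
      (PySem.List.pyRange 0 (faq.length : Int)).filter
          (fun i => decide (PySem.Str.find (PySem.List.pyGetD faq i "") "?" > 0)) =
        (qsF faq).map (fun i : Nat => (i : Int)) := by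
    rw [PySem.List.pyRange_zero_natCast, List.filter_map]
    rw [qsF_eq]
    refine congrArg (List.map (fun i : Nat => (i : Int))) (List.filter_congr ?_)
    intro i _
    simp [PySem.List.pyGetD_natCast, qB]
  simp only [convert]
  rw [hqidx]
  rw [PySem.List.foldl_append_singleton_eq_map, List.nil_append, List.length_map]
  rcases hn : qsF faq with _ | ⟨j0, js⟩
  · simp only [hn, List.map_nil, List.length_nil, Nat.cast_zero, PA, chainE]
    rw [PySem.List.pyRange_one_eq_nil (by norm_num)]
    rfl
  · simp only [hn, PA]
    rw [← chainE_eq (fA faq) (j0 :: js)]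
    simp only [List.length_cons, Nat.add_sub_cancel]
    rw [pyRange_one_natCast js.length, List.map_map]
    apply List.map_congr_left
    intro k hk
    simp only [Function.comp_apply]
    have h1 : ((k + 1 : Nat) : Int) - 1 = ((k : Nat) : Int) := by push_cast; ring
    rw [h1]
    rw [show (0 : Int) = ((0 : Nat) : Int) by norm_num]
    rw [PySem.List.pyGetD_map (fun i : Nat => (i : Int)) (j0 :: js) ((k : Nat) : Int) 0,
      PySem.List.pyGetD_map (fun i : Nat => (i : Int)) (j0 :: js) (((k + 1 : Nat) : Nat) : Int) 0,
      PySem.List.pyGetD_natCast, PySem.List.pyGetD_natCast, PySem.List.pyGetD_natCast]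
    have hc : (((j0 :: js).getD k 0 : Nat) : Int) + 1 = (((j0 :: js).getD k 0 + 1 : Nat) : Int) := by
      push_cast; ring
    rw [hc, innerFold' faq ((j0 :: js).getD k 0 + 1) ((j0 :: js).getD (k + 1) 0) ""]
    rw [String.empty_append]
    simp [fA, entryQR]

-- ===== VERDICT (by name: the statement is the Claim_ definition above) =====
theorem convert_spec : Claim_equal_convert := by
  intro faq _
  unfold Spec_convert
  rw [convert_eq_PA, convert_alt_eq_specTop, specTop_eq_PA]
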